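-- pv_equiv track=rewrite | github.com/ucczs/AoC_2021 | 20_py/20_02/20_02.py | replaceBorder
-- ===== SOURCE A (Python) =====
-- def replaceBorder(inputImage, symbol):
--     for idx, row in enumerate(inputImage):
--         if idx == 0 or idx == len(inputImage)-1:
--             inputImage[idx] = [symbol for _ in range(len(inputImage[0]))]
--         else:
--             inputImage[idx][0] = symbol
--             inputImage[idx][-1] = symbol
--
--     return inputImage
-- ===== SOURCE B (Python) =====
-- def replaceBorder(inputImage, symbol):
--     n = len(inputImage)
--     return [
--         [symbol] * len(inputImage[0]) if i == 0 or i == n - 1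
--         else [symbol if j == 0 or j == len(row) - 1 else cell
--               for j, cell in enumerate(row)]
--         for i, row in enumerate(inputImage)
--     ]
-- ===== Notes on version B (the rewrite author's own statement) =====
-- stated objective: alternative
-- what changed: B builds a brand-new grid with a per-cell border predicate (cell-wise comprehension mapping every cell to symbol-or-original) instead of A's in-place index assignments that write only two cells per interior row; A mutates its argument, B does not (return values are equal).
import Mathlib
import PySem

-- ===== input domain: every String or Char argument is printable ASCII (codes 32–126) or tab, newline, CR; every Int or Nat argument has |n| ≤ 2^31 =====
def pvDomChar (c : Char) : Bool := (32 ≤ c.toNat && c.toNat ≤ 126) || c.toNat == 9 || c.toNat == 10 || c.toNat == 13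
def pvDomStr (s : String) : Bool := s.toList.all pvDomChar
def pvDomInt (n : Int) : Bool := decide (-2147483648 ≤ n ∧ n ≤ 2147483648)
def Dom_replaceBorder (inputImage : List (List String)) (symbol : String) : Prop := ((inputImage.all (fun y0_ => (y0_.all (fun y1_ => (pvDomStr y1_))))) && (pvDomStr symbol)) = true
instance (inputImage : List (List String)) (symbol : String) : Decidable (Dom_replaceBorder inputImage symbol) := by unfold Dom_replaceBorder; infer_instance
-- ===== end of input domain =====

-- B builds a new grid with a per-cell border predicate instead of A's in-place two-cell writes
-- (objective: alternative). A mutates inputImage in place, B does not: the equivalence proved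
-- here is about the RETURN value only.

-- row[0] = symbol; row[-1] = symbol  (A performs exactly these two index assignments;
-- on an empty row Python raises IndexError — such inputs are excluded by Pre_ below)
def pySetEnds (row : List String) (symbol : String) : List String :=
  let row1 := row.set 0 symbol
  row1.set (row1.length - 1) symbol

-- ===== PORT A =====
-- for idx, row in enumerate(inputImage): … — the loop mutates the list it iterates over, so the
-- fold reads acc (the current list) for len(inputImage[0]) and inputImage[idx], as Python does.
def replaceBorder (inputImage : List (List String)) (symbol : String) : List (List String) :=
  (List.range inputImage.length).foldl
    (fun acc idx =>
      if idx = 0 ∨ idx = inputImage.length - 1 then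
        acc.set idx (List.replicate ((acc.headD []).length) symbol)
      else
        acc.set idx (pySetEnds (acc.getD idx []) symbol))
    inputImage

-- ===== PORT B =====
-- cell-wise comprehension: border rows become [symbol]*len(inputImage[0]); every cell of an
-- interior row is mapped through 'symbol if j==0 or j==len(row)-1 else cell'
def replaceBorder_alt (inputImage : List (List String)) (symbol : String) : List (List String) :=
  let n := inputImage.length
  inputImage.mapIdx (fun i row =>
    if i = 0 ∨ i = n - 1 then
      List.replicate ((inputImage.headD []).length) symbol
    else
      row.mapIdx (fun j cell => if j = 0 ∨ j = row.length - 1 then symbol else cell))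

-- ===== PRECONDITION & SPEC =====
-- Pre_ excludes grids with an empty interior row: there Python A raises IndexError on row[0].
def Pre_replaceBorder (inputImage : List (List String)) (symbol : String) : Prop :=
  ((inputImage.drop 1).dropLast.all (fun row => !row.isEmpty)) = true
instance (inputImage : List (List String)) (symbol : String) : Decidable (Pre_replaceBorder inputImage symbol) := by unfold Pre_replaceBorder; infer_instance
def pvWitness_replaceBorder : List (List String) × String := ([["a", "b"], ["c"], ["d", "e"]], "#")

def Spec_replaceBorder (inputImage : List (List String)) (symbol : String) (out : List (List String)) : Prop := out = replaceBorder_alt inputImage symbol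
instance (inputImage : List (List String)) (symbol : String) (out : List (List String)) : Decidable (Spec_replaceBorder inputImage symbol out) := by unfold Spec_replaceBorder; infer_instance

-- ===== CLAIM (what is proved, stated in full; the proofs are below) =====
def Claim_equal_replaceBorder : Prop := ∀ (inputImage : List (List String)) (symbol : String), Dom_replaceBorder inputImage symbol → Pre_replaceBorder inputImage symbol → Spec_replaceBorder inputImage symbol (replaceBorder inputImage symbol)

-- ===== LEMMAS AND PROOFS =====

-- the common characterization: row i of the result
def targetRow (img : List (List String)) (symbol : String) (i : Nat) (row : List String) : List String :=
  if i = 0 ∨ i = img.length - 1 then List.replicate ((img.headD []).length) symbol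
  else pySetEnds row symbol

def targetMap (img : List (List String)) (symbol : String) (k : Nat) : List (List String) :=
  img.mapIdx (fun i row => if i < k then targetRow img symbol i row else row)

lemma length_targetMap (img : List (List String)) (symbol : String) (k : Nat) :
    (targetMap img symbol k).length = img.length := by simp [targetMap]

lemma getElem_targetMap (img : List (List String)) (symbol : String) (k i : Nat)
    (hi : i < img.length) :
    (targetMap img symbol k)[i]'(by simpa [length_targetMap] using hi)
      = if i < k then targetRow img symbol i (img[i]) else img[i] := by
  simp [targetMap]

lemma headD_len (img : List (List String)) (h : 0 < img.length) :
    (img.headD []).length = (img[0]'h).length := by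
  cases img with
  | nil => simp at h
  | cons a l => rfl

lemma foldA_eq_targetMap (img : List (List String)) (symbol : String) (k : Nat)
    (hk : k ≤ img.length) :
    ((List.range k).foldl
      (fun acc idx =>
        if idx = 0 ∨ idx = img.length - 1 then
          acc.set idx (List.replicate ((acc.headD []).length) symbol)
        else
          acc.set idx (pySetEnds (acc.getD idx []) symbol))
      img) = targetMap img symbol k := by
  induction k with
  | zero =>
    apply List.ext_getElem (by simp [length_targetMap])
    intro i h1 h2
    rw [getElem_targetMap img symbol 0 i (by simpa using h1)]
    simp
  | succ k ih =>
    have hk' : k < img.length := hk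
    rw [List.range_succ, List.foldl_append, ih (le_of_lt hk')]
    have hM0 : 0 < (targetMap img symbol k).length := by
      rw [length_targetMap]; omega
    have hMk : k < (targetMap img symbol k).length := by
      rw [length_targetMap]; exact hk'
    have hhead : ((targetMap img symbol k).headD []).length = (img.headD []).length := by
      rw [headD_len _ hM0, getElem_targetMap img symbol k 0 (by omega),
          headD_len img (by omega)]
      by_cases h0 : 0 < k
      · rw [if_pos h0]
        simp only [targetRow]
        rw [if_pos (Or.inl trivial), List.length_replicate, headD_len img (by omega)]
      · rw [if_neg h0]
    have hget : (targetMap img symbol k).getD k [] = img[k]'hk' := by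
      rw [List.getD_eq_getElem _ _ hMk, getElem_targetMap img symbol k k hk']
      simp
    simp only [List.foldl_cons, List.foldl_nil]
    apply List.ext_getElem
    · by_cases hc : k = 0 ∨ k = img.length - 1 <;>
        simp [hc, length_targetMap]
    · intro i h1 h2
      have hi : i < img.length := by
        by_cases hc : k = 0 ∨ k = img.length - 1 <;>
          simpa [hc, length_targetMap] using h1
      rw [getElem_targetMap img symbol (k+1) i hi]
      by_cases hc : k = 0 ∨ k = img.length - 1
      · simp only [hc, if_true]
        rw [List.getElem_set]
        by_cases hik : k = i
        · subst hik
          rw [if_pos rfl, if_pos (Nat.lt_succ_self k)]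
          simp only [targetRow]
          rw [if_pos hc, hhead]
        · have hlt : (i < k + 1) = (i < k) := by
            apply propext; constructor <;> intro h <;> omega
          rw [if_neg hik, getElem_targetMap img symbol k i hi]; simp only [hlt]
      · simp only [hc, if_false]
        rw [List.getElem_set]
        by_cases hik : k = i
        · subst hik
          rw [if_pos rfl, if_pos (Nat.lt_succ_self k), hget]
          simp only [targetRow]
          rw [if_neg hc]
        · have hlt : (i < k + 1) = (i < k) := by
            apply propext; constructor <;> intro h <;> omega
          rw [if_neg hik, getElem_targetMap img symbol k i hi]; simp only [hlt]

lemma replaceBorder_eq_targetMap (img : List (List String)) (symbol : String) :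
    replaceBorder img symbol = targetMap img symbol img.length :=
  foldA_eq_targetMap img symbol img.length (le_refl _)

-- the two index assignments of pySetEnds write exactly the cells B's per-cell map rewrites
lemma pySetEnds_eq_mapIdx (row : List String) (symbol : String) :
    pySetEnds row symbol
      = row.mapIdx (fun j cell => if j = 0 ∨ j = row.length - 1 then symbol else cell) := by
  apply List.ext_getElem
  · simp [pySetEnds]
  · intro i h1 h2
    have hi : i < row.length := by simpa [pySetEnds] using h1
    simp only [pySetEnds, List.getElem_set, List.getElem_mapIdx, List.length_set]
    by_cases h0 : 0 = i
    · subst h0; simp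
    · by_cases hl : row.length - 1 = i
      · simp [h0, hl.symm]
      · have : ¬ (i = 0 ∨ i = row.length - 1) := by
          push_neg; exact ⟨fun h => h0 h.symm, fun h => hl h.symm⟩
        simp [h0, hl, this]

lemma alt_eq_targetMap (img : List (List String)) (symbol : String) :
    replaceBorder_alt img symbol = targetMap img symbol img.length := by
  simp only [replaceBorder_alt, targetMap, targetRow]
  apply List.ext_getElem
  · simp
  · intro i h1 h2
    have hi : i < img.length := by simpa using h1
    simp only [List.getElem_mapIdx, hi, if_pos, pySetEnds_eq_mapIdx]

-- ===== VERDICT (by name: the statement is the Claim_ definition above) =====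
theorem replaceBorder_spec : Claim_equal_replaceBorder := by
  intro img symbol _ _
  unfold Spec_replaceBorder
  rw [replaceBorder_eq_targetMap, alt_eq_targetMap]
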